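-- pv_equiv track=rewrite | github.com/vipulraheja/iterater | code/crawler/src/parse_latexdiff_doc_level.py | drop_irrelevant_parts
-- ===== SOURCE A (Python) =====
-- def drop_irrelevant_parts(text: str) -> str:
--     """Drop paragraphs that do not contain latexdiff commands"""
--     filtered_paragraphs = []
--     delbegin_count = addbegin_count = 0
--     paragraphs = text.split('\n\n')
--     excludes = set()
--     for i, para in enumerate(paragraphs):
--         if all(command not in para for command in ['\DIFdelbegin', '\DIFaddbegin', '\DIFdelend', '\DIFaddend']):
--             # need to check the opened commands as a command may span across paragraphs
--             if delbegin_count <= 0 and addbegin_count <= 0: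
--                 excludes.add(i)
--         else:
--             delbegin_count += para.count('\DIFdelbegin')
--             addbegin_count += para.count('\DIFaddbegin')
--             delbegin_count -= para.count('\DIFdelend')
--             addbegin_count -= para.count('\DIFaddend')
--
--     filtered_paragraphs = [para for i, para in enumerate(paragraphs) if i not in excludes]
--     return '\n\n'.join(filtered_paragraphs)
-- ===== SOURCE B (Python) =====
-- def drop_irrelevant_parts(text: str) -> str:
--     """Drop paragraphs that do not contain latexdiff commands"""
--     paragraphs = text.split('\n\n')
--     has = [('\DIFdelbegin' in p) or ('\DIFaddbegin' in p)
--            or ('\DIFdelend' in p) or ('\DIFaddend' in p) for p in paragraphs]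
--     ddelta = [p.count('\DIFdelbegin') - p.count('\DIFdelend') if h else 0
--               for p, h in zip(paragraphs, has)]
--     adelta = [p.count('\DIFaddbegin') - p.count('\DIFaddend') if h else 0
--               for p, h in zip(paragraphs, has)]
--     dbal = [0]
--     for x in ddelta:
--         dbal.append(dbal[-1] + x)
--     abal = [0]
--     for x in adelta:
--         abal.append(abal[-1] + x)
--     return '\n\n'.join(p for p, h, d, a in zip(paragraphs, has, dbal, abal)
--                        if h or d > 0 or a > 0)
-- ===== Notes on version B (the rewrite author's own statement) =====
-- stated objective: alternative
-- what changed: Replaces A's stateful enumerate loop that mutates two counters and an excludes index set followed by a second index-membership filtering pass with a stage-wise pipeline: per-paragraph command flags and net deltas, explicit prefix-sum balance lists, and one declarative zip filter keyed on the balance before each paragraph.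
import Mathlib
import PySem

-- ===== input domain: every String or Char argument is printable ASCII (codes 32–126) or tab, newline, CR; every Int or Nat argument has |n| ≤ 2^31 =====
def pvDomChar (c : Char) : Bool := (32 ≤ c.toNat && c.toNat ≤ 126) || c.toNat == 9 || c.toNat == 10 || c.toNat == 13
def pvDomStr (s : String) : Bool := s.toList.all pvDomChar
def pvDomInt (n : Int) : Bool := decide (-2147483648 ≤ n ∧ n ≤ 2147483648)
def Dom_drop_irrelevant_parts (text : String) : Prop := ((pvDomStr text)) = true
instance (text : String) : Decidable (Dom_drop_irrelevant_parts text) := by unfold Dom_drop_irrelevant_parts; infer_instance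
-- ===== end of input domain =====

-- B replaces A's stateful index-then-filter loop by a staged pipeline (flags, deltas, prefix-sum balances, one zip filter); return value only, no mutation.

-- the four latexdiff command literals (Python's '\\DIFdelbegin' is a literal backslash + DIFdelbegin)
def pvCmds : List String := ["\\DIFdelbegin", "\\DIFaddbegin", "\\DIFdelend", "\\DIFaddend"]

-- ===== PORT A =====
-- A's loop body: the `all(command not in para)` test, the excludes update, the four counter updates
def pvStepA (s : Int × Int × PySem.Set Int) (ip : Int × String) : Int × Int × PySem.Set Int :=
  if pvCmds.all (fun command => !PySem.Str.isIn command ip.2) then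
    if s.1 ≤ 0 ∧ s.2.1 ≤ 0 then (s.1, s.2.1, PySem.Set.add s.2.2 ip.1) else s
  else
    let d := s.1 + (PySem.Str.count ip.2 "\\DIFdelbegin" : Int)
    let a := s.2.1 + (PySem.Str.count ip.2 "\\DIFaddbegin" : Int)
    let d := d - (PySem.Str.count ip.2 "\\DIFdelend" : Int)
    let a := a - (PySem.Str.count ip.2 "\\DIFaddend" : Int)
    (d, a, s.2.2)

def drop_irrelevant_parts (text : String) : String :=
  -- text.split('\n\n'): sep is the nonempty literal "\n\n", so split? is always `some`
  let paragraphs := (PySem.Str.split? text "\n\n").getD []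
  let st := (PySem.List.enumerate paragraphs 0).foldl pvStepA (0, 0, PySem.Set.empty)
  let filtered := (PySem.List.enumerate paragraphs 0).foldl
    (fun acc ip => if PySem.Set.contains st.2.2 ip.1 then acc else acc ++ [ip.2]) []
  PySem.Str.join "\n\n" filtered

-- ===== PORT B =====
-- the four-way `or` of `in` tests from Source B's `has` comprehension
def pvHasB (p : String) : Bool :=
  PySem.Str.isIn "\\DIFdelbegin" p || PySem.Str.isIn "\\DIFaddbegin" p ||
  PySem.Str.isIn "\\DIFdelend" p || PySem.Str.isIn "\\DIFaddend" p

def drop_irrelevant_parts_alt (text : String) : String :=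
  let paragraphs := (PySem.Str.split? text "\n\n").getD []
  let has := paragraphs.map pvHasB
  let ddelta := (paragraphs.zip has).map
    (fun ph => if ph.2 then (PySem.Str.count ph.1 "\\DIFdelbegin" : Int) - (PySem.Str.count ph.1 "\\DIFdelend" : Int) else 0)
  let adelta := (paragraphs.zip has).map
    (fun ph => if ph.2 then (PySem.Str.count ph.1 "\\DIFaddbegin" : Int) - (PySem.Str.count ph.1 "\\DIFaddend" : Int) else 0)
  -- dbal = [0]; for x in ddelta: dbal.append(dbal[-1] + x)   (dbal is never empty, so dbal[-1] = getLastD 0)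
  let dbal := ddelta.foldl (fun acc x => acc ++ [acc.getLastD 0 + x]) [(0 : Int)]
  let abal := adelta.foldl (fun acc x => acc ++ [acc.getLastD 0 + x]) [(0 : Int)]
  let kept := ((paragraphs.zip (has.zip (dbal.zip abal))).filter
      (fun q => q.2.1 || decide ((0:Int) < q.2.2.1) || decide ((0:Int) < q.2.2.2))).map (fun q => q.1)
  PySem.Str.join "\n\n" kept

-- ===== PRECONDITION & SPEC =====
def Spec_drop_irrelevant_parts (text : String) (out : String) : Prop := out = drop_irrelevant_parts_alt text
instance (text : String) (out : String) : Decidable (Spec_drop_irrelevant_parts text out) := by unfold Spec_drop_irrelevant_parts; infer_instance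

-- ===== CLAIM (what is proved, stated in full; the proofs are below) =====
def Claim_equal_drop_irrelevant_parts : Prop := ∀ (text : String), Dom_drop_irrelevant_parts text → Spec_drop_irrelevant_parts text (drop_irrelevant_parts text)

-- ===== LEMMAS AND PROOFS =====

-- whether a paragraph contains some latexdiff command (A's phrasing)
def pvHas (p : String) : Bool := pvCmds.any (fun cmd => PySem.Str.isIn cmd p)
-- net counter deltas of a command paragraph
def pvDd (p : String) : Int := (PySem.Str.count p "\\DIFdelbegin" : Int) - (PySem.Str.count p "\\DIFdelend" : Int)
def pvDa (p : String) : Int := (PySem.Str.count p "\\DIFaddbegin" : Int) - (PySem.Str.count p "\\DIFaddend" : Int)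
-- the deltas Source B stores in ddelta/adelta (0 for non-command paragraphs)
def pvDelD (p : String) : Int := if pvHasB p then pvDd p else 0
def pvDelA (p : String) : Int := if pvHasB p then pvDa p else 0

lemma pvHasB_eq (p : String) : pvHasB p = pvHas p := by
  simp [pvHasB, pvHas, pvCmds, Bool.or_assoc]

-- the list of kept paragraphs, as one reference recursion (both ports reduce to it)
def pvKeep : List String → Int → Int → List String
  | [], _, _ => []
  | p :: t, d, a =>
    if pvHas p then p :: pvKeep t (d + pvDd p) (a + pvDa p)
    else if d > 0 ∨ a > 0 then p :: pvKeep t d a else pvKeep t d a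

-- ---- A-side lemmas ----

-- the indices A's first pass excludes, processing from index k with counters d, a
def pvExc : List String → Int → Int → Int → List Int
  | [], _, _, _ => []
  | p :: t, k, d, a =>
    if pvHas p then pvExc t (k + 1) (d + pvDd p) (a + pvDa p)
    else if d ≤ 0 ∧ a ≤ 0 then k :: pvExc t (k + 1) d a else pvExc t (k + 1) d a

lemma pvExc_ge (ps : List String) (k d a : Int) : ∀ j ∈ pvExc ps k d a, k ≤ j := by
  induction ps generalizing k d a with
  | nil => simp [pvExc]
  | cons p t ih =>
    intro j hj
    simp only [pvExc] at hj
    split at hj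
    · exact le_trans (by omega) (ih (k + 1) _ _ j hj)
    · split at hj
      · rcases List.mem_cons.mp hj with h | h
        · omega
        · exact le_trans (by omega) (ih (k + 1) d a j h)
      · exact le_trans (by omega) (ih (k + 1) d a j hj)

lemma pvA_fold (ps : List String) (k d a : Int) (exc0 : List Int)
    (h0 : ∀ j ∈ exc0, j < k) :
    ((PySem.List.enumerate ps k).foldl pvStepA (d, a, exc0)).2.2
      = exc0 ++ pvExc ps k d a := by
  induction ps generalizing k d a exc0 with
  | nil => simp [pvExc, PySem.List.enumerate_nil]
  | cons p t ih =>
    rw [PySem.List.enumerate_cons, List.foldl_cons]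
    have hall : (pvCmds.all (fun command => !PySem.Str.isIn command p)) = !pvHas p := by
      simp [pvHas, pvCmds]
    by_cases hc : pvHas p
    · rw [pvExc, if_pos hc]
      show (List.foldl pvStepA (pvStepA (d, a, exc0) (k, p)) _).2.2 = _
      rw [show pvStepA (d, a, exc0) (k, p)
            = (d + pvDd p, a + pvDa p, exc0) by
          simp only [pvStepA, hall, hc, Bool.not_true, Bool.false_eq_true, if_false]
          simp [pvDd, pvDa, add_sub_assoc]]
      exact ih (k + 1) _ _ exc0 (fun j hj => lt_trans (h0 j hj) (by omega))
    · rw [pvExc, if_neg hc]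
      show (List.foldl pvStepA (pvStepA (d, a, exc0) (k, p)) _).2.2 = _
      by_cases hz : d ≤ 0 ∧ a ≤ 0
      · have hk : k ∉ exc0 := fun h => absurd (h0 k h) (lt_irrefl k)
        have hadd : PySem.Set.add exc0 k = exc0 ++ [k] := by
          simp [PySem.Set.add, PySem.Set.contains]
          intro h; exact absurd h hk
        rw [show pvStepA (d, a, exc0) (k, p) = (d, a, exc0 ++ [k]) by
            simp only [pvStepA, hall, hc, Bool.not_false, if_true]
            rw [if_pos hz, hadd]]
        rw [ih (k + 1) d a (exc0 ++ [k])
          (by intro j hj; rcases List.mem_append.mp hj with h | h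
              · exact lt_trans (h0 j h) (by omega)
              · simp at h; omega)]
        rw [if_pos hz]
        simp
      · rw [show pvStepA (d, a, exc0) (k, p) = (d, a, exc0) by
            simp only [pvStepA, hall, hc, Bool.not_false, if_true]
            rw [if_neg hz]]
        rw [ih (k + 1) d a exc0 (fun j hj => lt_trans (h0 j hj) (by omega)), if_neg hz]

lemma pvFilt (ps : List String) (k d a : Int) (E : List Int) (acc : List String)
    (hE : ∀ j : Int, k ≤ j → (j ∈ E ↔ j ∈ pvExc ps k d a)) :
    (PySem.List.enumerate ps k).foldl
      (fun acc ip => if PySem.Set.contains E ip.1 then acc else acc ++ [ip.2]) acc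
      = acc ++ pvKeep ps d a := by
  induction ps generalizing k d a acc with
  | nil => simp [pvKeep, PySem.List.enumerate_nil]
  | cons p t ih =>
    rw [PySem.List.enumerate_cons, List.foldl_cons]
    have hge := pvExc_ge
    by_cases hc : pvHas p
    · have hkE : PySem.Set.contains E k = false := by
        simp only [PySem.Set.contains, List.contains_iff_mem, Bool.eq_false_iff, ne_eq]
        intro h
        have := (hE k le_rfl).mp h
        rw [pvExc, if_pos hc] at this
        have := hge t (k + 1) _ _ k this; omega
      rw [hkE, if_neg (by simp)]
      rw [pvKeep, if_pos hc]
      rw [ih (k + 1) (d + pvDd p) (a + pvDa p) (acc ++ [p])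
        (by intro j hj
            rw [hE j (by omega), pvExc, if_pos hc])]
      simp
    · by_cases hz : d > 0 ∨ a > 0
      · have hkE : PySem.Set.contains E k = false := by
          simp only [PySem.Set.contains, List.contains_iff_mem, Bool.eq_false_iff, ne_eq]
          intro h
          have := (hE k le_rfl).mp h
          rw [pvExc, if_neg hc, if_neg (by omega)] at this
          have := hge t (k + 1) d a k this; omega
        rw [hkE, if_neg (by simp)]
        rw [pvKeep, if_neg hc, if_pos hz]
        rw [ih (k + 1) d a (acc ++ [p])
          (by intro j hj
              rw [hE j (by omega), pvExc, if_neg hc, if_neg (by omega)])]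
        simp
      · have hkE : PySem.Set.contains E k = true := by
          simp only [PySem.Set.contains, List.contains_iff_mem]
          rw [hE k le_rfl, pvExc, if_neg hc, if_pos (by omega)]
          exact List.mem_cons_self
        rw [hkE, if_pos rfl]
        rw [pvKeep, if_neg hc, if_neg hz]
        refine ih (k + 1) d a acc ?_
        intro j hj
        rw [hE j (by omega), pvExc, if_neg hc, if_pos (by omega)]
        constructor
        · intro h; rcases List.mem_cons.mp h with h | h
          · omega
          · exact h
        · intro h; exact List.mem_cons_of_mem _ h

-- ---- B-side lemmas ----

-- the suffix a prefix-sum scan appends after a running total d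
def pvTailScan (d : Int) : List Int → List Int
  | [] => []
  | x :: xs => (d + x) :: pvTailScan (d + x) xs

lemma pvScan_fold (xs : List Int) (acc : List Int) (hacc : acc ≠ []) :
    xs.foldl (fun acc x => acc ++ [acc.getLastD 0 + x]) acc
      = acc ++ pvTailScan (acc.getLastD 0) xs := by
  induction xs generalizing acc with
  | nil => simp [pvTailScan]
  | cons x t ih =>
    rw [List.foldl_cons, ih (acc ++ [acc.getLastD 0 + x]) (by simp)]
    rw [show (acc ++ [acc.getLastD 0 + x]).getLastD 0 = acc.getLastD 0 + x by
        simp]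
    simp [pvTailScan]

lemma pvZip_map_self {α β : Type} (ps : List α) (g : α → β) :
    ps.zip (ps.map g) = ps.map (fun p => (p, g p)) := by
  induction ps with
  | nil => rfl
  | cons p t ih => simp [ih]

lemma pvB_keep (ps : List String) (d a : Int) :
    ((ps.zip ((ps.map pvHasB).zip
        ((d :: pvTailScan d (ps.map pvDelD)).zip (a :: pvTailScan a (ps.map pvDelA))))).filter
      (fun q => q.2.1 || decide ((0:Int) < q.2.2.1) || decide ((0:Int) < q.2.2.2))).map (fun q => q.1)
      = pvKeep ps d a := by
  induction ps generalizing d a with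
  | nil => simp [pvKeep]
  | cons p t ih =>
    simp only [List.map_cons, pvTailScan, List.zip_cons_cons, List.filter_cons]
    by_cases hc : pvHas p
    · have hb : pvHasB p = true := by rw [pvHasB_eq]; exact hc
      have hdD : pvDelD p = pvDd p := by simp [pvDelD, hb]
      have hdA : pvDelA p = pvDa p := by simp [pvDelA, hb]
      have ih' := ih (d + pvDd p) (a + pvDa p)
      rw [List.zip_cons_cons] at ih'
      rw [pvKeep, if_pos hc]
      simp [hb, hdD, hdA, ih']
    · have hb : pvHasB p = false := by rw [pvHasB_eq]; simp [hc]
      have hdD : pvDelD p = 0 := by simp [pvDelD, hb]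
      have hdA : pvDelA p = 0 := by simp [pvDelA, hb]
      have ih' := ih d a
      rw [List.zip_cons_cons] at ih'
      rw [pvKeep, if_neg hc]
      by_cases hz : d > 0 ∨ a > 0
      · rw [if_pos hz]
        rcases hz with h | h <;> simp [hb, hdD, hdA, ih', h]
      · rw [if_neg hz]
        have h1 : ¬ (0:Int) < d := fun h => hz (Or.inl h)
        have h2 : ¬ (0:Int) < a := fun h => hz (Or.inr h)
        simp [hb, hdD, hdA, ih', h1, h2]

-- ===== VERDICT (by name: the statement is the Claim_ definition above) =====
theorem drop_irrelevant_parts_spec : Claim_equal_drop_irrelevant_parts := by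
  intro text _
  unfold Spec_drop_irrelevant_parts drop_irrelevant_parts drop_irrelevant_parts_alt
  simp only
  congr 1
  -- A's side reduces to pvKeep
  rw [pvA_fold _ 0 0 0 PySem.Set.empty (by simp [PySem.Set.empty])]
  rw [pvFilt _ 0 0 0 (PySem.Set.empty ++ pvExc _ 0 0 0) []
    (fun j _ => by simp [PySem.Set.empty]), List.nil_append]
  -- B's side reduces to pvKeep
  rw [pvZip_map_self]
  rw [show ((((PySem.Str.split? text "\n\n").getD []).map (fun p => (p, pvHasB p))).map
        (fun ph => if ph.2 then (PySem.Str.count ph.1 "\\DIFdelbegin" : Int) - (PySem.Str.count ph.1 "\\DIFdelend" : Int) else 0))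
      = ((PySem.Str.split? text "\n\n").getD []).map pvDelD by
    rw [List.map_map]; rfl]
  rw [show ((((PySem.Str.split? text "\n\n").getD []).map (fun p => (p, pvHasB p))).map
        (fun ph => if ph.2 then (PySem.Str.count ph.1 "\\DIFaddbegin" : Int) - (PySem.Str.count ph.1 "\\DIFaddend" : Int) else 0))
      = ((PySem.Str.split? text "\n\n").getD []).map pvDelA by
    rw [List.map_map]; rfl]
  rw [pvScan_fold _ [0] (by simp), pvScan_fold _ [0] (by simp)]
  simp only [show ([(0:Int)].getLastD 0) = 0 from rfl, List.singleton_append]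
  exact (pvB_keep _ 0 0).symm
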